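-- pv_equiv track=rewrite | github.com/BaroqueEngine/procon | past/16/G/1.py | f
-- ===== SOURCE A (Python) =====
-- def is_triangle(a, b, c):
--     return (a + b > c) and (b + c > a) and (c + a > b)
--
-- def f(arr):
--     if len(arr) == 0:
--         return 1
--     ret = 0
--     i = 0
--     for j in range(i + 1, len(arr)):
--         for k in range(j + 1, len(arr)):
--             if is_triangle(arr[i], arr[j], arr[k]):
--                 ret += f(arr[i + 1: j] + arr[j + 1: k] + arr[k + 1:])
--     return ret
-- ===== SOURCE B (Python) =====
-- def is_triangle(a, b, c):
--     return (a + b > c) and (b + c > a) and (c + a > b)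
--
-- def f(arr):
--     # top-down dynamic programming: memoize the count for each remaining sub-sequence
--     cache = {}
--     def go(rest):
--         if len(rest) == 0:
--             return 1
--         key = tuple(rest)
--         if key in cache:
--             return cache[key]
--         total = 0
--         for j in range(1, len(rest)):
--             for k in range(j + 1, len(rest)):
--                 if is_triangle(rest[0], rest[j], rest[k]):
--                     total += go(rest[1:j] + rest[j + 1:k] + rest[k + 1:])
--         cache[key] = total
--         return total
--     return go(arr)
-- ===== Notes on version B (the rewrite author's own statement) =====
-- stated objective: alternative
-- what changed: B replaces A's naive recursion by top-down dynamic programming: a dict memoizes the partition count for each remaining sub-sequence, so each distinct remaining sub-sequence is solved once instead of once per path that reaches it (a large win on triangle-dense inputs, about the same cost on random ones).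
import Mathlib
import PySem

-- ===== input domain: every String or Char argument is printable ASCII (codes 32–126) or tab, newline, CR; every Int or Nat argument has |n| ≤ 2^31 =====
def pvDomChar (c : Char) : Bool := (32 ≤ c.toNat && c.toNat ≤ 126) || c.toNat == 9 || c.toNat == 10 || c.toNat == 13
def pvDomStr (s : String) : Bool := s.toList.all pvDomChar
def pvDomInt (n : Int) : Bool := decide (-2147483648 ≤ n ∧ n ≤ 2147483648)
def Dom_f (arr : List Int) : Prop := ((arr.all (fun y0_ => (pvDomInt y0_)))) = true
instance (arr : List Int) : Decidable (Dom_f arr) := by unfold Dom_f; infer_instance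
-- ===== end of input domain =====

-- B replaces A's naive recursion over remaining sub-sequences by top-down dynamic
-- programming: a dict memoizes the count for each remaining sub-sequence (objective: alternative).

-- ===== PORT A =====
def isTriangle (a b c : Int) : Bool := decide (a + b > c) && decide (b + c > a) && decide (c + a > b)

-- fuel = arr.length bounds the recursion depth (each recursive call drops 3 elements);
-- the fuel only makes the transliteration total, the branch structure is Python's.
def fGo : Nat → List Int → Int
  | 0, _ => 1
  | fuel + 1, arr =>
    if arr.length = 0 then 1
    else
      let i : Int := 0
      -- indices i, j, k are always in range, so pyGetD's default is never consulted
      (PySem.List.pyRange (i + 1) arr.length 1).foldl (fun ret j =>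
        (PySem.List.pyRange (j + 1) arr.length 1).foldl (fun ret k =>
          if isTriangle (PySem.List.pyGetD arr i 0) (PySem.List.pyGetD arr j 0) (PySem.List.pyGetD arr k 0) then
            ret + fGo fuel (PySem.List.slice arr (some (i + 1)) (some j) ++
                            PySem.List.slice arr (some (j + 1)) (some k) ++
                            PySem.List.slice arr (some (k + 1)) none)
          else ret) ret) 0

def f (arr : List Int) : Int := fGo arr.length arr

-- ===== PORT B =====
-- go(rest) with the memo dict threaded through explicitly; same fuel device as for A.
def fAltGo : Nat → PySem.Dict (List Int) Int → List Int → Int × PySem.Dict (List Int) Int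
  | 0, c, _ => (1, c)
  | fuel + 1, c, rest =>
    if rest.length = 0 then (1, c)
    else
      match PySem.Dict.get? c rest with
      | some v => (v, c)
      | none =>
        let p := (PySem.List.pyRange 1 rest.length 1).foldl (fun (st : Int × PySem.Dict (List Int) Int) j =>
          (PySem.List.pyRange (j + 1) rest.length 1).foldl (fun (st : Int × PySem.Dict (List Int) Int) k =>
            if isTriangle (PySem.List.pyGetD rest 0 0) (PySem.List.pyGetD rest j 0) (PySem.List.pyGetD rest k 0) then
              let r := fAltGo fuel st.2 (PySem.List.slice rest (some 1) (some j) ++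
                                         PySem.List.slice rest (some (j + 1)) (some k) ++
                                         PySem.List.slice rest (some (k + 1)) none)
              (st.1 + r.1, r.2)
            else st) st) (0, c)
        (p.1, PySem.Dict.insert p.2 rest p.1)

def f_alt (arr : List Int) : Int := (fAltGo arr.length PySem.Dict.empty arr).1

-- ===== PRECONDITION & SPEC =====
def Spec_f (arr : List Int) (out : Int) : Prop := out = f_alt arr
instance (arr : List Int) (out : Int) : Decidable (Spec_f arr out) := by unfold Spec_f; infer_instance

-- ===== CLAIM (what is proved, stated in full; the proofs are below) =====
def Claim_equal_f : Prop := ∀ (arr : List Int), Dom_f arr → Spec_f arr (f arr)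

-- ===== LEMMAS AND PROOFS =====

theorem slices_length (arr : List Int) (j k : Int) (h1 : 1 ≤ j) (h2 : j < k)
    (h3 : k < (arr.length : Int)) :
    (PySem.List.slice arr (some 1) (some j) ++
                            PySem.List.slice arr (some (j + 1)) (some k) ++
                            PySem.List.slice arr (some (k + 1)) none).length = arr.length - 3 := by
  rw [PySem.List.slice_toNat arr (by omega) (by omega),
      PySem.List.slice_toNat arr (by omega) (by omega),
      PySem.List.slice_from arr (by omega : (0:Int) ≤ k + 1)]
  simp [List.length_take, List.length_drop]
  omega

theorem fGo_eq (fa : Nat) : ∀ (fb : Nat) (arr : List Int),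
    arr.length ≤ fa → arr.length ≤ fb → fGo fa arr = fGo fb arr := by
  induction fa with
  | zero =>
    intro fb arr ha _
    have : arr = [] := List.length_eq_zero_iff.mp (by omega)
    subst this
    cases fb <;> simp [fGo]
  | succ a ih =>
    intro fb arr ha hb
    cases fb with
    | zero =>
      have : arr = [] := List.length_eq_zero_iff.mp (by omega)
      subst this
      simp [fGo]
    | succ b =>
      by_cases hz : arr.length = 0
      · simp [fGo, hz]
      · simp only [fGo, hz, if_false, zero_add]
        refine PySem.List.foldl_congr_mem _ _ _ _ ?_
        intro ret j hj
        refine PySem.List.foldl_congr_mem _ _ _ _ ?_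
        intro ret2 k hk
        rw [PySem.List.mem_pyRange_one] at hj hk
        have hsub : (PySem.List.slice arr (some 1) (some j) ++
                            PySem.List.slice arr (some (j + 1)) (some k) ++
                            PySem.List.slice arr (some (k + 1)) none).length = arr.length - 3 :=
          slices_length arr j k (by omega) (by omega) (by omega)
        rw [ih b (PySem.List.slice arr (some 1) (some j) ++
                            PySem.List.slice arr (some (j + 1)) (some k) ++
                            PySem.List.slice arr (some (k + 1)) none) (by omega) (by omega)]

theorem fGo_eq_f (fuel : Nat) (arr : List Int) (h : arr.length ≤ fuel) :
    fGo fuel arr = f arr :=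
  fGo_eq fuel arr.length arr h le_rfl

-- A-side recursion, one unfolding, with f itself on the sub-lists
theorem f_unfold (arr : List Int) (hz : arr.length ≠ 0) :
    f arr = (PySem.List.pyRange 1 arr.length 1).foldl (fun ret j =>
      (PySem.List.pyRange (j + 1) arr.length 1).foldl (fun ret k =>
        if isTriangle (PySem.List.pyGetD arr 0 0) (PySem.List.pyGetD arr j 0) (PySem.List.pyGetD arr k 0) then
          ret + f (PySem.List.slice arr (some 1) (some j) ++
                            PySem.List.slice arr (some (j + 1)) (some k) ++
                            PySem.List.slice arr (some (k + 1)) none)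
        else ret) ret) 0 := by
  show fGo arr.length arr = _
  have hstep : fGo arr.length arr = fGo ((arr.length - 1) + 1) arr := by
    congr 1
    omega
  rw [hstep]
  simp only [fGo, hz, if_false, zero_add]
  refine PySem.List.foldl_congr_mem _ _ _ _ ?_
  intro ret j hj
  refine PySem.List.foldl_congr_mem _ _ _ _ ?_
  intro ret2 k hk
  rw [PySem.List.mem_pyRange_one] at hj hk
  have hsub : (PySem.List.slice arr (some 1) (some j) ++
                            PySem.List.slice arr (some (j + 1)) (some k) ++
                            PySem.List.slice arr (some (k + 1)) none).length = arr.length - 3 :=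
    slices_length arr j k (by omega) (by omega) (by omega)
  rw [fGo_eq_f (arr.length - 1) (PySem.List.slice arr (some 1) (some j) ++
                            PySem.List.slice arr (some (j + 1)) (some k) ++
                            PySem.List.slice arr (some (k + 1)) none) (by omega)]

-- memo invariant: every stored value is the true count of its key
def CacheOK (c : PySem.Dict (List Int) Int) : Prop :=
  ∀ k v, PySem.Dict.get? c k = some v → v = f k

theorem fAltGo_correct (fuel : Nat) : ∀ (arr : List Int) (c : PySem.Dict (List Int) Int),
    arr.length ≤ fuel → CacheOK c →
    (fAltGo fuel c arr).1 = f arr ∧ CacheOK (fAltGo fuel c arr).2 := by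
  induction fuel with
  | zero =>
    intro arr c ha hc
    have : arr = [] := List.length_eq_zero_iff.mp (by omega)
    subst this
    exact ⟨rfl, hc⟩
  | succ fu ih =>
    intro arr c ha hc
    by_cases hz : arr.length = 0
    · have : arr = [] := List.length_eq_zero_iff.mp hz
      subst this
      simp only [fAltGo]
      exact ⟨rfl, hc⟩
    · rcases hg : PySem.Dict.get? c arr with _ | v
      · -- cache miss
        have aux_inner : ∀ (j : Int), 1 ≤ j → j < (arr.length : Int) →
            ∀ (lk : List Int), (∀ k ∈ lk, j < k ∧ k < (arr.length : Int)) →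
            ∀ (st : Int × PySem.Dict (List Int) Int), CacheOK st.2 →
            (lk.foldl (fun (st : Int × PySem.Dict (List Int) Int) k =>
              if isTriangle (PySem.List.pyGetD arr 0 0) (PySem.List.pyGetD arr j 0) (PySem.List.pyGetD arr k 0) then
                let r := fAltGo fu st.2 (PySem.List.slice arr (some 1) (some j) ++
                            PySem.List.slice arr (some (j + 1)) (some k) ++
                            PySem.List.slice arr (some (k + 1)) none)
                (st.1 + r.1, r.2)
              else st) st).1 = lk.foldl (fun ret k =>
              if isTriangle (PySem.List.pyGetD arr 0 0) (PySem.List.pyGetD arr j 0) (PySem.List.pyGetD arr k 0) then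
                ret + f (PySem.List.slice arr (some 1) (some j) ++
                            PySem.List.slice arr (some (j + 1)) (some k) ++
                            PySem.List.slice arr (some (k + 1)) none)
              else ret) st.1 ∧
            CacheOK (lk.foldl (fun (st : Int × PySem.Dict (List Int) Int) k =>
              if isTriangle (PySem.List.pyGetD arr 0 0) (PySem.List.pyGetD arr j 0) (PySem.List.pyGetD arr k 0) then
                let r := fAltGo fu st.2 (PySem.List.slice arr (some 1) (some j) ++
                            PySem.List.slice arr (some (j + 1)) (some k) ++
                            PySem.List.slice arr (some (k + 1)) none)
                (st.1 + r.1, r.2)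
              else st) st).2 := by
          intro j hj1 hj2 lk
          induction lk with
          | nil => intro _ st hst; exact ⟨rfl, hst⟩
          | cons k rest ihk =>
            intro hmem st hst
            have hk := hmem k (by simp)
            by_cases ht : isTriangle (PySem.List.pyGetD arr 0 0) (PySem.List.pyGetD arr j 0) (PySem.List.pyGetD arr k 0) = true
            · simp only [List.foldl_cons, ht, if_true]
              have hsub : (PySem.List.slice arr (some 1) (some j) ++
                            PySem.List.slice arr (some (j + 1)) (some k) ++
                            PySem.List.slice arr (some (k + 1)) none).length = arr.length - 3 :=
                slices_length arr j k hj1 hk.1 hk.2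
              have hrec := ih (PySem.List.slice arr (some 1) (some j) ++
                            PySem.List.slice arr (some (j + 1)) (some k) ++
                            PySem.List.slice arr (some (k + 1)) none) st.2 (by omega) hst
              have hstep := ihk (fun k2 hk2 => hmem k2 (by simp [hk2]))
                (st.1 + (fAltGo fu st.2 (PySem.List.slice arr (some 1) (some j) ++
                            PySem.List.slice arr (some (j + 1)) (some k) ++
                            PySem.List.slice arr (some (k + 1)) none)).1,
                 (fAltGo fu st.2 (PySem.List.slice arr (some 1) (some j) ++
                            PySem.List.slice arr (some (j + 1)) (some k) ++
                            PySem.List.slice arr (some (k + 1)) none)).2) hrec.2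
              refine ⟨?_, hstep.2⟩
              rw [hstep.1, hrec.1]
            · simp only [List.foldl_cons, ht]
              exact ihk (fun k2 hk2 => hmem k2 (by simp [hk2])) st hst
        have aux_outer : ∀ (lj : List Int), (∀ j ∈ lj, 1 ≤ j ∧ j < (arr.length : Int)) →
            ∀ (st : Int × PySem.Dict (List Int) Int), CacheOK st.2 →
            (lj.foldl (fun (st : Int × PySem.Dict (List Int) Int) j =>
              (PySem.List.pyRange (j + 1) arr.length 1).foldl (fun (st : Int × PySem.Dict (List Int) Int) k =>
              if isTriangle (PySem.List.pyGetD arr 0 0) (PySem.List.pyGetD arr j 0) (PySem.List.pyGetD arr k 0) then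
                let r := fAltGo fu st.2 (PySem.List.slice arr (some 1) (some j) ++
                            PySem.List.slice arr (some (j + 1)) (some k) ++
                            PySem.List.slice arr (some (k + 1)) none)
                (st.1 + r.1, r.2)
              else st) st) st).1 =
            lj.foldl (fun ret j =>
              (PySem.List.pyRange (j + 1) arr.length 1).foldl (fun ret k =>
              if isTriangle (PySem.List.pyGetD arr 0 0) (PySem.List.pyGetD arr j 0) (PySem.List.pyGetD arr k 0) then
                ret + f (PySem.List.slice arr (some 1) (some j) ++
                            PySem.List.slice arr (some (j + 1)) (some k) ++
                            PySem.List.slice arr (some (k + 1)) none)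
              else ret) ret) st.1 ∧
            CacheOK (lj.foldl (fun (st : Int × PySem.Dict (List Int) Int) j =>
              (PySem.List.pyRange (j + 1) arr.length 1).foldl (fun (st : Int × PySem.Dict (List Int) Int) k =>
              if isTriangle (PySem.List.pyGetD arr 0 0) (PySem.List.pyGetD arr j 0) (PySem.List.pyGetD arr k 0) then
                let r := fAltGo fu st.2 (PySem.List.slice arr (some 1) (some j) ++
                            PySem.List.slice arr (some (j + 1)) (some k) ++
                            PySem.List.slice arr (some (k + 1)) none)
                (st.1 + r.1, r.2)
              else st) st) st).2 := by
          intro lj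
          induction lj with
          | nil => intro _ st hst; exact ⟨rfl, hst⟩
          | cons j rest ihj =>
            intro hmem st hst
            have hj := hmem j (by simp)
            simp only [List.foldl_cons]
            have hin := aux_inner j hj.1 hj.2 (PySem.List.pyRange (j + 1) arr.length 1)
              (fun k hk => by
                rw [PySem.List.mem_pyRange_one] at hk
                exact ⟨by omega, hk.2⟩) st hst
            have hrest := ihj (fun j2 hj2 => hmem j2 (by simp [hj2])) _ hin.2
            refine ⟨?_, hrest.2⟩
            rw [hrest.1, hin.1]
        have hval : (fAltGo (fu + 1) c arr).1 = f arr := by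
          simp only [fAltGo, hz, if_false, hg]
          have hout := aux_outer (PySem.List.pyRange 1 arr.length 1)
            (fun j hj => by rw [PySem.List.mem_pyRange_one] at hj; exact hj) (0, c) hc
          rw [hout.1]
          exact (f_unfold arr hz).symm
        refine ⟨hval, ?_⟩
        have hout := aux_outer (PySem.List.pyRange 1 arr.length 1)
          (fun j hj => by rw [PySem.List.mem_pyRange_one] at hj; exact hj) (0, c) hc
        simp only [fAltGo, hz, if_false, hg] at hval ⊢
        intro k v hv
        rw [PySem.Dict.get?_insert] at hv
        by_cases hk : k = arr
        · subst hk
          rw [if_pos rfl] at hv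
          cases hv
          exact hval
        · rw [if_neg hk] at hv
          exact hout.2 k v hv
      · -- cache hit
        simp only [fAltGo, hz, if_false, hg]
        exact ⟨hc arr v hg, hc⟩

-- ===== VERDICT (by name: the statement is the Claim_ definition above) =====
theorem f_spec : Claim_equal_f := by
  intro arr _
  show f arr = f_alt arr
  have h := fAltGo_correct arr.length arr PySem.Dict.empty le_rfl
    (by intro k v hv; rw [PySem.Dict.get?_empty] at hv; cases hv)
  exact h.1.symm
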